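-- pv_equiv track=rewrite | github.com/PikaBeka/tensorRT-mbnet | create_csv.py | find_headers_metric
-- ===== SOURCE A (Python) =====
-- def takeName(possible_header):
--     if possible_header == '[CUDA memcpy DtoH]':
--         return 'DtoH'
--     if possible_header == '[CUDA memcpy HtoD]':
--         return 'HtoD'
--     if possible_header == '[CUDA memset]':
--         return 'memset'
--
--     if possible_header[:5] == "void ":
--         possible_header = possible_header[5:]
--
--     word = ''
--     for ch in possible_header:
--         # if ch == ' ':  # only one word required
--         #     word = ''
--         #     continue
--         if ch == '(':  # in case we find parameters we stop
--             break
--         word += ch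
--     return word
--
-- def find_headers_metric(data, headers):
--     toStart = 0
--     for elem in data:
--         elem = elem.split()
--
--         if elem[0] == 'Kernel:':
--             possibleHeader = ''
--             # go from backward since the kernel name is the last columns
--             for word in reversed(elem):
--                 if word[0].isdigit():
--                     break
--                 possibleHeader = word + " " + possibleHeader
--             # function retrieves only name without conf
--             header = takeName(possibleHeader.strip())
--             if header not in headers:  # add only if unique
--                 headers.append(header)
--     return headers
-- ===== SOURCE B (Python) =====
-- # B: forward single-pass accumulator instead of A's backward scan with break,
-- # and a table+find/slice takeName instead of the if-chain with a char loop.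
-- # Like A, it appends to `headers` in place and returns it.
--
-- _SPECIAL = {
--     '[CUDA memcpy DtoH]': 'DtoH',
--     '[CUDA memcpy HtoD]': 'HtoD',
--     '[CUDA memset]': 'memset',
-- }
--
-- def takeName(possible_header):
--     special = _SPECIAL.get(possible_header)
--     if special is not None:
--         return special
--     if possible_header.startswith('void '):
--         possible_header = possible_header[5:]
--     i = possible_header.find('(')
--     return possible_header if i < 0 else possible_header[:i]
--
-- def find_headers_metric(data, headers):
--     for line in data:
--         parts = line.split()
--         if parts[0] == 'Kernel:':
--             acc = ''
--             for word in parts: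
--                 if word[0].isdigit():
--                     acc = ''
--                 else:
--                     acc += word + ' '
--             header = takeName(acc.strip())
--             if header not in headers:
--                 headers.append(header)
--     return headers
-- ===== Notes on version B (the rewrite author's own statement) =====
-- stated objective: simpler
-- what changed: The backward scan with break over reversed tokens is replaced by a forward single pass that resets an accumulator at digit-starting tokens, and takeName's if-chain plus char-by-char copy loop is replaced by a constant table lookup plus find('(')/slice.
import Mathlib
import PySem

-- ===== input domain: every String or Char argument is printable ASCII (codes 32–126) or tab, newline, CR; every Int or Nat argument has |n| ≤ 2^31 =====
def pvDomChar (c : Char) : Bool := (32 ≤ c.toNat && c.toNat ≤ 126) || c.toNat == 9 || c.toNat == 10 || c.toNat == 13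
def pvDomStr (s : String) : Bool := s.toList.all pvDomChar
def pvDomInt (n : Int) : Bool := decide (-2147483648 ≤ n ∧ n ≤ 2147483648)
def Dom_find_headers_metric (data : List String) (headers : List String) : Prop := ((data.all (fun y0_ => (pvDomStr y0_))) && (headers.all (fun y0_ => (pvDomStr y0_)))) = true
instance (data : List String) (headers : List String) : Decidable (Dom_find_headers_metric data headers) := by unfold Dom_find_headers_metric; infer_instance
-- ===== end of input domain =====

-- B replaces A's backward scan-with-break by a forward reset-on-digit accumulator and
-- A's char-loop takeName by a table lookup plus find/slice (objective: simpler).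
-- Like A, the Python B appends to `headers` in place; the equivalence here is about the return value.

-- ===== PORT A =====
-- `word += ch` loop of A's takeName (break on '(')
def takeNameALoop : List Char → List Char → List Char
  | [], word => word
  | c :: cs, word => if c = '(' then word else takeNameALoop cs (word ++ [c])

def takeNameA (h : List Char) : List Char :=
  if h = "[CUDA memcpy DtoH]".toList then "DtoH".toList
  else if h = "[CUDA memcpy HtoD]".toList then "HtoD".toList
  else if h = "[CUDA memset]".toList then "memset".toList
  else
    let h := if PySem.List.slice h none (some 5) = "void ".toList then PySem.List.slice h (some 5) none else h
    takeNameALoop h []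

-- `for word in reversed(elem): if word[0].isdigit(): break; possibleHeader = word + " " + possibleHeader`
-- (tokens of split() are never empty, so the headD default is unreachable where Python returns)
def backScanA : List String → List Char → List Char
  | [], acc => acc
  | w :: ws, acc =>
      if PySem.Chars.isdigit (w.toList.headD ' ') then acc
      else backScanA ws (w.toList ++ ' ' :: acc)

def find_headers_metric (data : List String) (headers : List String) : List String :=
  match data with
  | [] => headers
  | line :: rest =>
      let elem := PySem.Str.split₀ line
      -- elem[0]: Pre_ guarantees elem ≠ [] (Python raises IndexError otherwise)
      if elem.headD "" = "Kernel:" then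
        let possibleHeader := backScanA elem.reverse []
        let header := String.ofList (takeNameA (PySem.Chars.strip possibleHeader))
        find_headers_metric rest (if header ∈ headers then headers else headers ++ [header])
      else find_headers_metric rest headers

-- ===== PORT B =====
def specialB : PySem.Dict String String :=
  PySem.Dict.mk [("[CUDA memcpy DtoH]", "DtoH"), ("[CUDA memcpy HtoD]", "HtoD"), ("[CUDA memset]", "memset")]

def takeNameB (h : List Char) : List Char :=
  match specialB.get? (String.ofList h) with
  | some s => s.toList
  | none =>
      let h := if PySem.Chars.startswith h "void ".toList then PySem.List.slice h (some 5) none else h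
      let i := PySem.Chars.find h ['(']
      if i < 0 then h else PySem.Chars.slice h none (some i)

-- forward pass: reset the accumulator on a digit-starting token, else append token + ' '
def fwdScanB : List String → List Char → List Char
  | [], acc => acc
  | w :: ws, acc =>
      fwdScanB ws (if PySem.Chars.isdigit (w.toList.headD ' ') then [] else acc ++ w.toList ++ [' '])

def find_headers_metric_alt (data : List String) (headers : List String) : List String :=
  match data with
  | [] => headers
  | line :: rest =>
      let parts := PySem.Str.split₀ line
      if parts.headD "" = "Kernel:" then
        let acc := fwdScanB parts []
        let header := String.ofList (takeNameB (PySem.Chars.strip acc))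
        find_headers_metric_alt rest (if header ∈ headers then headers else headers ++ [header])
      else find_headers_metric_alt rest headers

-- ===== PRECONDITION & SPEC =====
-- A indexes elem[0] on every line; it raises IndexError on any line that is empty or whitespace-only
-- (split() = []). Exactly those inputs are excluded.
def Pre_find_headers_metric (data : List String) (headers : List String) : Prop :=
  ∀ line ∈ data, PySem.Str.split₀ line ≠ []
instance (data : List String) (headers : List String) : Decidable (Pre_find_headers_metric data headers) := by unfold Pre_find_headers_metric; infer_instance

def pvWitness_find_headers_metric : List String × List String :=
  (["Kernel: 1.0 void myKern(int*)", "API calls: stuff"], ["old"])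

def Spec_find_headers_metric (data : List String) (headers : List String) (out : List String) : Prop := out = find_headers_metric_alt data headers
instance (data : List String) (headers : List String) (out : List String) : Decidable (Spec_find_headers_metric data headers out) := by unfold Spec_find_headers_metric; infer_instance

-- ===== CLAIM (what is proved, stated in full; the proofs are below) =====
def Claim_equal_find_headers_metric : Prop := ∀ (data : List String) (headers : List String), Dom_find_headers_metric data headers → Pre_find_headers_metric data headers → Spec_find_headers_metric data headers (find_headers_metric data headers)

-- ===== LEMMAS AND PROOFS =====

theorem backScanA_acc (l : List String) (acc : List Char) :
    backScanA l acc = backScanA l [] ++ acc := by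
  induction l generalizing acc with
  | nil => simp [backScanA]
  | cons w ws ih =>
      simp only [backScanA]
      split
      · simp
      · rw [ih (w.toList ++ ' ' :: acc), ih (w.toList ++ [' '])]
        simp

theorem fwdScanB_append (l l' : List String) (acc : List Char) :
    fwdScanB (l ++ l') acc = fwdScanB l' (fwdScanB l acc) := by
  induction l generalizing acc with
  | nil => simp [fwdScanB]
  | cons w ws ih => simp only [List.cons_append, fwdScanB]; exact ih _

theorem scan_eq (l : List String) : backScanA l.reverse [] = fwdScanB l [] := by
  induction l using List.reverseRecOn with
  | nil => rfl
  | append_singleton l w ih =>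
      rw [List.reverse_append, fwdScanB_append]
      simp only [List.reverse_singleton, List.singleton_append, backScanA, fwdScanB]
      split
      · rfl
      · rw [backScanA_acc, ih]
        simp

theorem takeNameALoop_eq (h : List Char) (word : List Char) :
    takeNameALoop h word = word ++ h.takeWhile (· ≠ '(') := by
  induction h generalizing word with
  | nil => simp [takeNameALoop]
  | cons c cs ih =>
      simp only [takeNameALoop, List.takeWhile_cons]
      by_cases hc : c = '('
      · simp [hc]
      · simp [hc, ih]

theorem takeWhile_eq_take (h : List Char) (i : Nat)
    (hgi : h[i]? = some '(') (hne : ∀ j, j < i → h[j]? ≠ some '(') :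
    h.takeWhile (· ≠ '(') = h.take i := by
  induction h generalizing i with
  | nil => simp at hgi
  | cons a as ih =>
      cases i with
      | zero =>
          simp only [List.getElem?_cons_zero, Option.some.injEq] at hgi
          simp [hgi]
      | succ n =>
          have ha : a ≠ '(' := by
            have := hne 0 (by omega)
            simpa using this
          simp only [List.takeWhile_cons, List.take_succ_cons, ha, decide_true, if_true,
            ne_eq, not_false_eq_true, List.cons.injEq, true_and]
          rw [ih n (by simpa using hgi)]
          intro j hj
          have := hne (j + 1) (by omega)
          simpa using this

-- A's char loop (break at '(') computes exactly what B's find-then-slice computes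
theorem takeWhile_eq_findSlice (h : List Char) :
    h.takeWhile (· ≠ '(') =
      (if PySem.Chars.find h ['('] < 0 then h
       else PySem.Chars.slice h none (some (PySem.Chars.find h ['(']))) := by
  by_cases hin : PySem.Chars.isIn ['('] h = true
  · have hf : 0 ≤ PySem.Chars.find h ['('] :=
      (PySem.Chars.find_nonneg_iff _ _).2 ((PySem.Chars.isIn_iff_infix _ _).1 hin)
    obtain ⟨hpre, hmin⟩ := PySem.Chars.find_spec (s := h) (sub := ['(']) hf
    rw [if_neg (by omega)]
    simp only [PySem.Chars.slice_eq_listSlice]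
    rw [PySem.List.slice_to _ hf]
    apply takeWhile_eq_take
    · rcases hpre with ⟨t, ht⟩
      have h0 : (List.drop (PySem.Chars.find h ['(']).toNat h)[0]? = h[(PySem.Chars.find h ['(']).toNat + 0]? :=
        List.getElem?_drop ..
      rw [← ht] at h0
      simpa using h0.symm
    · intro j hj hcontra
      rcases List.getElem?_eq_some_iff.1 hcontra with ⟨hjlen, hjval⟩
      apply hmin j hj
      refine ⟨(h.drop j).tail, ?_⟩
      rw [← List.getElem_cons_drop hjlen]
      simp [hjval]
  · have hnin : ¬ (['('] <:+: h) := fun hc => hin ((PySem.Chars.isIn_iff_infix _ _).2 hc)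
    rw [(PySem.Chars.find_eq_neg_one_iff _ _).2 hnin, if_pos (by omega)]
    apply List.takeWhile_eq_self_iff.mpr
    intro c hc
    simp only [decide_eq_true_eq]
    intro hcc
    exact hnin ((List.singleton_infix_iff _ _).2 (hcc ▸ hc))

theorem takeName_eq (h : List Char) : takeNameA h = takeNameB h := by
  unfold takeNameA takeNameB specialB
  by_cases h1 : h = "[CUDA memcpy DtoH]".toList
  · subst h1; rfl
  · by_cases h2 : h = "[CUDA memcpy HtoD]".toList
    · subst h2; rfl
    · by_cases h3 : h = "[CUDA memset]".toList
      · subst h3; rfl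
      · have hg : (PySem.Dict.mk [("[CUDA memcpy DtoH]", "DtoH"), ("[CUDA memcpy HtoD]", "HtoD"), ("[CUDA memset]", "memset")]).get? (String.ofList h) = none := by
          have e1 : String.ofList h ≠ "[CUDA memcpy DtoH]" :=
            fun hc => h1 (by have := congrArg String.toList hc; simpa using this)
          have e2 : String.ofList h ≠ "[CUDA memcpy HtoD]" :=
            fun hc => h2 (by have := congrArg String.toList hc; simpa using this)
          have e3 : String.ofList h ≠ "[CUDA memset]" :=
            fun hc => h3 (by have := congrArg String.toList hc; simpa using this)
          simp [e1.symm, e2.symm, e3.symm, PySem.Dict.get?]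
        rw [if_neg h1, if_neg h2, if_neg h3, hg]
        have hstart : (PySem.List.slice h none (some 5) = "void ".toList) ↔ PySem.Chars.startswith h "void ".toList = true := by
          rw [PySem.Chars.startswith_iff]
          rw [PySem.List.slice_to _ (by omega : (0:Int) ≤ 5)]
          constructor
          · intro he
            rw [List.prefix_iff_eq_take]
            simpa using he.symm
          · intro he
            rw [List.prefix_iff_eq_take] at he
            simpa using he.symm
        by_cases hv : PySem.Chars.startswith h "void ".toList = true
        · rw [if_pos (hstart.2 hv), if_pos hv]
          rw [takeNameALoop_eq, takeWhile_eq_findSlice]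
          simp
        · rw [if_neg (fun hc => hv (hstart.1 hc)), if_neg hv]
          rw [takeNameALoop_eq, takeWhile_eq_findSlice]
          simp

theorem find_headers_metric_eq (data : List String) (headers : List String)
    (hpre : Pre_find_headers_metric data headers) :
    find_headers_metric data headers = find_headers_metric_alt data headers := by
  induction data generalizing headers with
  | nil => rfl
  | cons line rest ih =>
      have hrest : Pre_find_headers_metric rest headers := by
        intro l hl; exact hpre l (List.mem_cons_of_mem _ hl)
      simp only [find_headers_metric, find_headers_metric_alt]
      rw [scan_eq, takeName_eq]
      split
      · exact ih _ hrest
      · exact ih _ hrest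

-- ===== VERDICT (by name: the statement is the Claim_ definition above) =====
theorem find_headers_metric_spec : Claim_equal_find_headers_metric := by
  intro data headers _ hpre
  exact find_headers_metric_eq data headers hpre
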